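-- pv_equiv track=rewrite | github.com/ilius/pyglossary | pyglossary/plugin_lib/dictdlib.py | b64_encode
-- ===== SOURCE A (Python) =====
-- b64_list = "ABCDEFGHIJKLMNOPQRSTUVWXYZabcdefghijklmnopqrstuvwxyz0123456789+/"
--
-- def b64_encode(val: int) -> str:
-- 	"""
-- 	Takes as input an integer val and returns a string of it encoded
-- 	with the base64 algorithm used by dict indexes.
-- 	"""
-- 	startfound = 0
-- 	retval = ""
-- 	for i in range(5, -1, -1):
-- 		thispart = (val >> (6 * i)) & ((2**6) - 1)
-- 		if (not startfound) and (not thispart):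
-- 			# Both zero -- keep going.
-- 			continue
-- 		startfound = 1
-- 		retval += b64_list[thispart]
-- 	if retval:
-- 		return retval
-- 	return b64_list[0]
-- ===== SOURCE B (Python) =====
-- b64_list = "ABCDEFGHIJKLMNOPQRSTUVWXYZabcdefghijklmnopqrstuvwxyz0123456789+/"
--
-- def b64_encode(val: int) -> str:
--     """
--     Takes as input an integer val and returns a string of it encoded
--     with the base64 algorithm used by dict indexes.
--     """
--     def enc(m: int) -> str:
--         if m < 64:
--             return b64_list[m]
--         return enc(m // 64) + b64_list[m % 64]
--     return enc(val % (1 << 36))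
-- ===== Notes on version B (the rewrite author's own statement) =====
-- stated objective: alternative
-- what changed: A scans six fixed six-bit chunks most-significant-first with a startfound flag deciding per chunk whether to emit; B first reduces val to its low thirty-six bits with one modulo and then expands that number by a recursive quotient/remainder base-sixty-four expansion, so leading zeros never arise and no flag, fixed chunk count or stripping is needed.
import Mathlib
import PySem

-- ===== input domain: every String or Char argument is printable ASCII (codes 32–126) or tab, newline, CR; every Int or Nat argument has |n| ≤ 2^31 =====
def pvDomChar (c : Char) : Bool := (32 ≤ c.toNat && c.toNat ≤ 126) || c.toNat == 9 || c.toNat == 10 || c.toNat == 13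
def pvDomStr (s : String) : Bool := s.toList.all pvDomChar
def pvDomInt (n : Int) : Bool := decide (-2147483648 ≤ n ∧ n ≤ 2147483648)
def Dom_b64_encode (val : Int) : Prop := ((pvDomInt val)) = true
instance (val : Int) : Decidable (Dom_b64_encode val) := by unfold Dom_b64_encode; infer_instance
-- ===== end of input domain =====

-- B replaces A's fixed six-chunk MSB-first scan with a startfound flag by a single reduction
-- modulo 2^36 followed by a recursive divmod-64 expansion (objective: alternative, same cost).

-- ===== PORT A =====
def pvB64A : String := "ABCDEFGHIJKLMNOPQRSTUVWXYZabcdefghijklmnopqrstuvwxyz0123456789+/"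

-- b64_list[i]: the indexed char as a one-char chunk; [] would be IndexError (unreachable: 0 ≤ i < 64)
def pvIdxA (i : Int) : List Char := ((PySem.Str.pyGet? pvB64A i).map (fun c => [c])).getD []

-- A's loop body: thispart = (val >> (6*i)) & 63 (>> as >>>, & 63 as PySem.Int.band; i ≥ 0 on
-- range(5,-1,-1) so .toNat is exact), then the startfound/continue logic, branches in order
def pvStepPortA (val : Int) (st : Int × List Char) (i : Int) : Int × List Char :=
  let thispart := PySem.Int.band (val >>> ((6 * i).toNat : Nat)) 63
  if st.1 = 0 ∧ thispart = 0 then st else (1, st.2 ++ pvIdxA thispart)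

def b64_encode (val : Int) : String :=
  -- state = (startfound, retval as a char list)
  let st := (PySem.List.pyRange 5 (-1) (-1)).foldl (pvStepPortA val) (0, [])
  if st.2 ≠ [] then String.mk st.2 else String.mk (pvIdxA 0)

-- ===== PORT B =====
def pvB64B : String := "ABCDEFGHIJKLMNOPQRSTUVWXYZabcdefghijklmnopqrstuvwxyz0123456789+/"

-- b64_list[d]: the indexed char as a one-char chunk; [] would be IndexError (unreachable: 0 ≤ d < 64)
def pvIdxB (d : Int) : List Char := ((PySem.Str.pyGet? pvB64B d).map (fun c => [c])).getD []

-- B's inner enc(m): base-64 expansion by recursive divmod (// and % via PySem; m ≥ 0 at every call)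
def pvEnc (m : Int) : List Char :=
  if m < 64 then pvIdxB m
  else pvEnc (PySem.Int.floordiv m 64) ++ pvIdxB (PySem.Int.mod m 64)
termination_by m.toNat
decreasing_by
  rw [PySem.Int.floordiv_eq_ediv_of_pos (by norm_num)]
  rename_i h
  omega

def b64_encode_alt (val : Int) : String :=
  -- enc(val % (1 << 36))
  String.mk (pvEnc (PySem.Int.mod val ((1 : Int) <<< (36 : Nat))))

-- ===== PRECONDITION & SPEC =====
def Spec_b64_encode (val : Int) (out : String) : Prop := out = b64_encode_alt val
instance (val : Int) (out : String) : Decidable (Spec_b64_encode val out) := by unfold Spec_b64_encode; infer_instance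

-- ===== CLAIM (what is proved, stated in full; the proofs are below) =====
def Claim_equal_b64_encode : Prop := ∀ (val : Int), Dom_b64_encode val → Spec_b64_encode val (b64_encode val)

-- ===== LEMMAS AND PROOFS =====

-- A's masking: a & 63 is a % 64 (Python floor-mod), for every integer a
theorem pv_band63 (a : Int) : PySem.Int.band a 63 = PySem.Int.mod a 64 := by
  rw [PySem.Int.mod_eq_emod_of_pos (by norm_num : (0:Int) < 64)]
  unfold PySem.Int.band
  have e : Int.toNat 63 = 63 := rfl
  rw [e]
  split_ifs with h h2 h3
  · have h1 : a.toNat &&& 63 = a.toNat % 64 := Nat.and_two_pow_sub_one_eq_mod a.toNat 6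
    rw [h1]; omega
  · norm_num at h2
  · have h1 : (63 : Nat) &&& (-a - 1).toNat = (-a - 1).toNat % 64 := by
      rw [Nat.and_comm]
      exact Nat.and_two_pow_sub_one_eq_mod (-a - 1).toNat 6
    rw [h1]; omega
  · norm_num at h3

-- the char both ports place for an in-range digit
def pvChr (d : Int) : Char := (PySem.Str.pyGet? pvB64A d).getD ' '

set_option maxHeartbeats 2000000 in
theorem pvIdxA_eq (d : Int) (h0 : 0 ≤ d) (h1 : d < 64) : pvIdxA d = [pvChr d] := by
  interval_cases d <;> decide

theorem pvIdxA_ne_nil (d : Int) (h0 : 0 ≤ d) (h1 : d < 64) : pvIdxA d ≠ [] := by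
  rw [pvIdxA_eq d h0 h1]; simp

-- A's loop body with the digit already extracted
def pvStepA (st : Int × List Char) (d : Int) : Int × List Char :=
  if st.1 = 0 ∧ d = 0 then st else (1, st.2 ++ pvIdxA d)

theorem pv_foldA_one (ds : List Int) (r : List Char) :
    ds.foldl pvStepA (1, r) = (1, r ++ (ds.map pvIdxA).flatten) := by
  induction ds generalizing r with
  | nil => simp
  | cons d ds ih => simp [pvStepA, ih]

theorem pv_foldA_zero (ds : List Int) :
    (ds.foldl pvStepA (0, [])).2
      = ((ds.dropWhile (fun d => d == 0)).map pvIdxA).flatten := by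
  induction ds with
  | nil => simp
  | cons d ds ih =>
    by_cases hd : d = 0
    · simpa [pvStepA, hd] using ih
    · simp [pvStepA, hd, pv_foldA_one]

-- the little-endian base-64 digit list of m, k digits
def pvDigitsLE : Nat → Int → List Int
  | 0, _ => []
  | k + 1, m => (m % 64) :: pvDigitsLE k (m / 64)

theorem pvDigitsLE_zero (k : Nat) : pvDigitsLE k 0 = List.replicate k 0 := by
  induction k with
  | zero => rfl
  | succ k ih => simp [pvDigitsLE, ih, List.replicate_succ]

theorem pvEnc_ne_nil (m : Int) (h : 0 ≤ m) : pvEnc m ≠ [] := by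
  rw [pvEnc]
  split_ifs with h64
  · exact pvIdxA_ne_nil m h h64
  · intro hc
    exact pvIdxA_ne_nil (PySem.Int.mod m 64)
      (PySem.Int.mod_nonneg m (by norm_num)) (PySem.Int.mod_lt m (by norm_num))
      (List.append_eq_nil_iff.mp hc).2

-- leading zero digits dropped, then encoded = the recursive divmod expansion
theorem pv_key (k : Nat) : ∀ m : Int, 0 ≤ m → m < 64 ^ k → 0 < m →
    (((pvDigitsLE k m).reverse.dropWhile (fun d => d == 0)).map pvIdxA).flatten
      = pvEnc m := by
  induction k with
  | zero =>
    intro m h0 hk hpos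
    norm_num at hk
    omega
  | succ k ih =>
    intro m h0 hk hpos
    simp only [pvDigitsLE, List.reverse_cons]
    by_cases hm : m < 64
    · rw [Int.ediv_eq_zero_of_lt h0 hm, pvDigitsLE_zero, List.reverse_replicate,
          List.dropWhile_append]
      have hrep : List.dropWhile (fun d => d == 0) (List.replicate k (0 : Int)) = [] := by
        induction k with
        | zero => rfl
        | succ k ih2 => simp [List.replicate_succ, List.dropWhile_cons, ih2]
      rw [hrep]
      have hmm : m % 64 = m := Int.emod_eq_of_lt h0 hm
      have hne : (m == 0) = false := by simp; omega
      simp only [List.isEmpty_nil, if_true, hmm, List.dropWhile_cons, hne,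
        List.dropWhile_nil]
      rw [pvEnc, if_pos hm]
      simp [show pvIdxB = pvIdxA from rfl]
    · push_neg at hm
      have h0' : 0 ≤ m / 64 := Int.ediv_nonneg h0 (by norm_num)
      have hpos' : 0 < m / 64 := by
        have := Int.le_ediv_iff_mul_le (a := 1) (b := m) (c := (64:Int)) (by norm_num)
        omega
      have hk' : m / 64 < 64 ^ k := by
        rw [Int.ediv_lt_iff_lt_mul (by norm_num)]
        calc m < 64 ^ (k + 1) := hk
        _ = 64 ^ k * 64 := by ring
      have hIH := ih (m / 64) h0' hk' hpos'
      have hne : List.dropWhile (fun d => d == 0) (pvDigitsLE k (m / 64)).reverse ≠ [] := by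
        intro hc
        exact pvEnc_ne_nil (m / 64) h0' (by rw [← hIH, hc]; rfl)
      rw [List.dropWhile_append, if_neg (by simpa [List.isEmpty_iff] using hne)]
      rw [List.map_append, List.flatten_append, hIH]
      conv_rhs => rw [pvEnc]
      rw [if_neg (by omega),
          PySem.Int.floordiv_eq_ediv_of_pos (by norm_num),
          PySem.Int.mod_eq_emod_of_pos (by norm_num)]
      simp [show pvIdxB = pvIdxA from rfl]

-- the digit A extracts by shift-and-mask is a base-64 digit of val % 2^36
theorem pv_digit (val : Int) (k : Nat) (hk : k ≤ 30) :
    PySem.Int.band (val >>> k) 63 = ((val % 68719476736) / 2 ^ k) % 64 := by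
  rw [pv_band63, PySem.Int.mod_eq_emod_of_pos (by norm_num : (0:Int) < 64)]
  have hshift : val >>> k = val / 2 ^ k := by
    rw [Int.shiftRight_eq_div_pow]; push_cast; ring
  rw [hshift]
  set m : Int := val % 68719476736 with hm
  set q : Int := val / 68719476736 with hq
  have hval : val = m + (q * 2 ^ (36 - k)) * 2 ^ k := by
    have h1 : m + 68719476736 * q = val := Int.emod_add_mul_ediv val 68719476736
    have h2 : (2:Int) ^ (36 - k) * 2 ^ k = 68719476736 := by
      rw [← pow_add, Nat.sub_add_cancel (by omega)]; norm_num
    calc val = m + 68719476736 * q := h1.symm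
    _ = m + (q * 2 ^ (36 - k)) * 2 ^ k := by rw [← h2]; ring
  conv_lhs => rw [hval]
  rw [Int.add_mul_ediv_right _ _ (by positivity)]
  have h3 : q * 2 ^ (36 - k) = (q * 2 ^ (30 - k)) * 64 := by
    have : (2:Int) ^ (36 - k) = 2 ^ (30 - k) * 64 := by
      rw [show (64:Int) = 2 ^ 6 from by norm_num, ← pow_add]
      congr 1; omega
    rw [this]; ring
  rw [h3]; omega

theorem pv_main (val : Int) : b64_encode val = b64_encode_alt val := by
  simp only [b64_encode, b64_encode_alt]
  rw [show PySem.List.pyRange 5 (-1) (-1) = [5,4,3,2,1,0] from by decide]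
  have hfold : List.foldl (pvStepPortA val) (0, []) [5,4,3,2,1,0]
      = List.foldl pvStepA (0, [])
          (([5,4,3,2,1,0] : List Int).map
            (fun (i : Int) => PySem.Int.band (val >>> ((6 * i).toNat : Nat)) 63)) := by
    rw [List.foldl_map]; rfl
  rw [hfold]
  set m : Int := val % 68719476736 with hmdef
  have hmod : PySem.Int.mod val ((1 : Int) <<< (36 : Nat)) = m := by
    rw [show ((1 : Int) <<< (36 : Nat)) = 68719476736 from by decide,
        PySem.Int.mod_eq_emod_of_pos (by norm_num)]
  have h0 : 0 ≤ m := Int.emod_nonneg val (by norm_num)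
  have hub : m < 68719476736 := Int.emod_lt_of_pos val (by norm_num)
  have hds : (([5,4,3,2,1,0] : List Int).map
        (fun (i : Int) => PySem.Int.band (val >>> ((6 * i).toNat : Nat)) 63))
      = (pvDigitsLE 6 m).reverse := by
    simp only [List.map_cons, List.map_nil]
    rw [show ((6 * (5:Int)).toNat : Nat) = 30 from rfl, show ((6 * (4:Int)).toNat : Nat) = 24 from rfl,
        show ((6 * (3:Int)).toNat : Nat) = 18 from rfl, show ((6 * (2:Int)).toNat : Nat) = 12 from rfl,
        show ((6 * (1:Int)).toNat : Nat) = 6 from rfl, show ((6 * (0:Int)).toNat : Nat) = 0 from rfl]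
    rw [pv_digit val 30 (by omega), pv_digit val 24 (by omega), pv_digit val 18 (by omega),
        pv_digit val 12 (by omega), pv_digit val 6 (by omega), pv_digit val 0 (by omega)]
    simp only [pvDigitsLE, List.reverse_cons, List.reverse_nil, List.nil_append,
      List.cons_append, ← hmdef]
    have d2 : m / 64 / 64 = m / 4096 := by
      rw [Int.ediv_ediv_of_nonneg (by norm_num : (0:Int) ≤ 64)]; norm_num
    have d3 : m / 4096 / 64 = m / 262144 := by
      rw [Int.ediv_ediv_of_nonneg (by norm_num : (0:Int) ≤ 4096)]; norm_num
    have d4 : m / 262144 / 64 = m / 16777216 := by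
      rw [Int.ediv_ediv_of_nonneg (by norm_num : (0:Int) ≤ 262144)]; norm_num
    have d5 : m / 16777216 / 64 = m / 1073741824 := by
      rw [Int.ediv_ediv_of_nonneg (by norm_num : (0:Int) ≤ 16777216)]; norm_num
    norm_num [d2, d3, d4, d5]
  rw [hds, hmod]
  by_cases hpos : 0 < m
  · rw [show (List.foldl pvStepA (0, []) (pvDigitsLE 6 m).reverse).2
          = ((((pvDigitsLE 6 m).reverse).dropWhile (fun d => d == 0)).map pvIdxA).flatten
        from pv_foldA_zero _]
    rw [pv_key 6 m h0 (by norm_num; omega) hpos]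
    rw [if_pos (pvEnc_ne_nil m h0)]
  · have hz : m = 0 := by omega
    rw [hz]
    rw [show (pvDigitsLE 6 0).reverse = List.replicate 6 0 from by decide]
    norm_num [pvStepA, List.foldl]
    rw [show pvEnc 0 = pvIdxB 0 from by rw [pvEnc]; norm_num]
    rfl

-- ===== VERDICT (by name: the statement is the Claim_ definition above) =====
theorem b64_encode_spec : Claim_equal_b64_encode := by
  intro val _
  unfold Spec_b64_encode
  exact pv_main val
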